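-- pv_equiv track=rewrite | github.com/calvin-sykes/advent-of-code-2023 | day11.py | distance_expanded
-- ===== SOURCE A (Python) =====
-- def distance_expanded(g1, g2, er, ec, factor):
--     dr = abs(g2[0] - g1[0])
--     dc = abs(g2[1] - g1[1])
--
--     # Expansion factor of two means adding one extra character
--     factor -= 1
--
--     # Add factor for each empty row/column in between
--     min_row = min(g2[0], g1[0])
--     max_row = max(g2[0], g1[0])
--     for ir in er:
--         if ir > min_row and ir < max_row:
--             dr += factor
--
--     min_col = min(g2[1], g1[1])
--     max_col = max(g2[1], g1[1])
--     for ic in ec: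
--         if ic > min_col and ic < max_col:
--             dc += factor
--     return dr + dc
-- ===== SOURCE B (Python) =====
-- def distance_expanded(g1, g2, er, ec, factor):
--     # Binary search on the sorted empty-row/column lists instead of scanning them.
--     def count_before(a, x, strict):
--         # number of elements of ascending list a that are < x (strict) / <= x (not strict)
--         lo, hi = 0, len(a)
--         while lo < hi:
--             mid = (lo + hi) // 2
--             if (a[mid] < x) if strict else (a[mid] <= x):
--                 lo = mid + 1
--             else:
--                 hi = mid
--         return lo
--
--     r1, r2 = min(g1[0], g2[0]), max(g1[0], g2[0])
--     c1, c2 = min(g1[1], g2[1]), max(g1[1], g2[1])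
--     es, cs = sorted(er), sorted(ec)
--     nr = max(0, count_before(es, r2, True) - count_before(es, r1, False))
--     nc = max(0, count_before(cs, c2, True) - count_before(cs, c1, False))
--     return (r2 - r1) + (c2 - c1) + (factor - 1) * (nr + nc)
-- ===== Notes on version B (the rewrite author's own statement) =====
-- stated objective: alternative
-- what changed: B sorts er/ec and counts the empty rows/columns inside each coordinate interval with a hand-rolled binary search (bisect_left/bisect_right style), multiplying the count by (factor-1), instead of A's linear scans that add factor per matching element.
import Mathlib
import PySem

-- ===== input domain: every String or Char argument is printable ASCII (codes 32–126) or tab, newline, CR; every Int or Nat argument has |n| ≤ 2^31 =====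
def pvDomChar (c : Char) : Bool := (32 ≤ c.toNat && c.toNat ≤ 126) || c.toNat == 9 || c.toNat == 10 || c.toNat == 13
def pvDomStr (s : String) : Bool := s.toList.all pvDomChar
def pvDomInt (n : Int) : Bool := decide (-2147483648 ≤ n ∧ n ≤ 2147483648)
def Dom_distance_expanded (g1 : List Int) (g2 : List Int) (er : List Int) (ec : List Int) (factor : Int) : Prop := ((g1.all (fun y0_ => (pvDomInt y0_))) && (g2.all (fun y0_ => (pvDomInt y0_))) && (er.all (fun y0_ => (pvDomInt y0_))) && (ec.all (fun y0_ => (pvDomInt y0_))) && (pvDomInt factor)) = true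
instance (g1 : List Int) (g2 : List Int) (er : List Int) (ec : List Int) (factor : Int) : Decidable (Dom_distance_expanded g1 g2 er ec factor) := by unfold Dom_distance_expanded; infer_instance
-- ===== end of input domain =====

-- B replaces A's linear scans over er/ec with binary search on their sorted copies (alternative algorithm).
-- Equivalence is about the return value; neither version mutates its arguments.

-- ===== PORT A =====
-- literal transliteration of A: absolute differences, factor -= 1, then one pass
-- over er and one over ec adding `factor` for each index strictly between the coordinates.
def distance_expanded (g1 : List Int) (g2 : List Int) (er : List Int) (ec : List Int) (factor : Int) : Int :=
  let dr := |PySem.List.pyGetD g2 0 0 - PySem.List.pyGetD g1 0 0|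
  let dc := |PySem.List.pyGetD g2 1 0 - PySem.List.pyGetD g1 1 0|
  let factor1 := factor - 1
  let min_row := min (PySem.List.pyGetD g2 0 0) (PySem.List.pyGetD g1 0 0)
  let max_row := max (PySem.List.pyGetD g2 0 0) (PySem.List.pyGetD g1 0 0)
  let dr := er.foldl (fun acc ir => if ir > min_row ∧ ir < max_row then acc + factor1 else acc) dr
  let min_col := min (PySem.List.pyGetD g2 1 0) (PySem.List.pyGetD g1 1 0)
  let max_col := max (PySem.List.pyGetD g2 1 0) (PySem.List.pyGetD g1 1 0)
  let dc := ec.foldl (fun acc ic => if ic > min_col ∧ ic < max_col then acc + factor1 else acc) dc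
  dr + dc

-- ===== PORT B =====
-- the inline conditional `(a[mid] < x) if strict else (a[mid] <= x)` of Source B
def pvCmp (x : Int) (strict : Bool) (y : Int) : Bool :=
  if strict then decide (y < x) else decide (y ≤ x)

-- Source B's `count_before`: the while-loop as recursion on hi - lo
def pvCountBefore (a : List Int) (x : Int) (strict : Bool) (lo hi : Nat) : Nat :=
  if _h : lo < hi then
    -- mid = (lo + hi) // 2, inlined
    if pvCmp x strict (a.getD ((lo + hi) / 2) 0) then pvCountBefore a x strict ((lo + hi) / 2 + 1) hi
    else pvCountBefore a x strict lo ((lo + hi) / 2)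
  else lo
termination_by hi - lo
decreasing_by all_goals omega

def distance_expanded_alt (g1 : List Int) (g2 : List Int) (er : List Int) (ec : List Int) (factor : Int) : Int :=
  let r1 := min (PySem.List.pyGetD g1 0 0) (PySem.List.pyGetD g2 0 0)
  let r2 := max (PySem.List.pyGetD g1 0 0) (PySem.List.pyGetD g2 0 0)
  let c1 := min (PySem.List.pyGetD g1 1 0) (PySem.List.pyGetD g2 1 0)
  let c2 := max (PySem.List.pyGetD g1 1 0) (PySem.List.pyGetD g2 1 0)
  let es := PySem.List.sorted er (fun y => y) false
  let cs := PySem.List.sorted ec (fun y => y) false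
  let nr : Int := max 0 ((pvCountBefore es r2 true 0 es.length : Int) - (pvCountBefore es r1 false 0 es.length : Int))
  let nc : Int := max 0 ((pvCountBefore cs c2 true 0 cs.length : Int) - (pvCountBefore cs c1 false 0 cs.length : Int))
  (r2 - r1) + (c2 - c1) + (factor - 1) * (nr + nc)

-- ===== PRECONDITION & SPEC =====
-- Pre_ excludes exactly the inputs where Python A raises IndexError: g1 or g2 shorter than 2.
def Pre_distance_expanded (g1 : List Int) (g2 : List Int) (er : List Int) (ec : List Int) (factor : Int) : Prop :=
  2 ≤ g1.length ∧ 2 ≤ g2.length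
instance (g1 : List Int) (g2 : List Int) (er : List Int) (ec : List Int) (factor : Int) : Decidable (Pre_distance_expanded g1 g2 er ec factor) := by unfold Pre_distance_expanded; infer_instance

def pvWitness_distance_expanded : List Int × List Int × List Int × List Int × Int :=
  ([0, 1], [4, 6], [2, 3], [3, 5, 2], 10)

def Spec_distance_expanded (g1 : List Int) (g2 : List Int) (er : List Int) (ec : List Int) (factor : Int) (out : Int) : Prop := out = distance_expanded_alt g1 g2 er ec factor
instance (g1 : List Int) (g2 : List Int) (er : List Int) (ec : List Int) (factor : Int) (out : Int) : Decidable (Spec_distance_expanded g1 g2 er ec factor out) := by unfold Spec_distance_expanded; infer_instance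

-- ===== CLAIM (what is proved, stated in full; the proofs are below) =====
def Claim_equal_distance_expanded : Prop := ∀ (g1 : List Int) (g2 : List Int) (er : List Int) (ec : List Int) (factor : Int), Dom_distance_expanded g1 g2 er ec factor → Pre_distance_expanded g1 g2 er ec factor → Spec_distance_expanded g1 g2 er ec factor (distance_expanded g1 g2 er ec factor)

-- ===== LEMMAS AND PROOFS =====

-- elements of a ≤-sorted list are monotone in the index
theorem pv_getD_mono (l : List Int) (hs : l.Pairwise (· ≤ ·)) (i j : Nat)
    (hij : i ≤ j) (hj : j < l.length) : l.getD i 0 ≤ l.getD j 0 := by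
  rcases Nat.lt_or_ge i j with h | h
  · have := (List.pairwise_iff_getElem.mp hs) i j (by omega) hj h
    rwa [List.getD_eq_getElem l 0 (by omega), List.getD_eq_getElem l 0 hj]
  · have : i = j := by omega
    subst this; exact le_refl _

-- a list whose first r positions satisfy p and whose rest do not has countP p = r
theorem pv_countP_boundary (p : Int → Bool) : ∀ (a : List Int) (r : Nat), r ≤ a.length →
    (∀ i, i < r → p (a.getD i 0) = true) →
    (∀ i, r ≤ i → i < a.length → p (a.getD i 0) = false) →
    a.countP p = r := by
  intro a
  induction a with
  | nil => intro r hr _ _; simp at hr; simp [hr]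
  | cons h t ih =>
    intro r hr h1 h2
    cases r with
    | zero =>
      have hh : p h = false := h2 0 (by omega) (by simp)
      have : t.countP p = 0 := ih 0 (by omega) (by omega)
        (fun i _ hi => h2 (i + 1) (by omega) (by simpa using Nat.succ_lt_succ hi))
      simp [List.countP_cons, hh, this]
    | succ s =>
      have hh : p h = true := h1 0 (by omega)
      have ht : t.countP p = s := ih s (by simpa using hr)
        (fun i hi => h1 (i + 1) (by omega))
        (fun i hi hil => h2 (i + 1) (by omega) (by simpa using Nat.succ_lt_succ hil))
      simp [List.countP_cons, hh, ht]

-- pvCmp is downward closed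
theorem pv_pvCmp_mono (x : Int) (strict : Bool) (y z : Int) (hzy : z ≤ y)
    (hy : pvCmp x strict y = true) : pvCmp x strict z = true := by
  cases strict <;> simp [pvCmp] at hy ⊢ <;> omega

-- correctness of Source B's binary search on a sorted list
theorem pv_countBefore_spec (a : List Int) (x : Int) (strict : Bool)
    (hs : a.Pairwise (· ≤ ·)) : ∀ (n lo hi : Nat), hi - lo = n → lo ≤ hi → hi ≤ a.length →
    (∀ i, i < lo → pvCmp x strict (a.getD i 0) = true) →
    (∀ i, hi ≤ i → i < a.length → pvCmp x strict (a.getD i 0) = false) →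
    pvCountBefore a x strict lo hi = a.countP (pvCmp x strict) := by
  intro n
  induction n using Nat.strong_induction_on with
  | _ n ih =>
    intro lo hi hn hlohi hhi hL hR
    rw [pvCountBefore]
    split
    · rename_i hlt
      have hmid1 : lo ≤ (lo + hi) / 2 := by omega
      have hmid2 : (lo + hi) / 2 < hi := by omega
      split
      · rename_i hc
        refine ih (hi - ((lo + hi) / 2 + 1)) (by omega) _ _ rfl (by omega) hhi ?_ hR
        intro i hi'
        rcases Nat.lt_or_ge i lo with h | h
        · exact hL i h
        · exact pv_pvCmp_mono x strict _ _
            (pv_getD_mono a hs i ((lo + hi) / 2) (by omega) (by omega)) hc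
      · rename_i hc
        refine ih ((lo + hi) / 2 - lo) (by omega) _ _ rfl (by omega) (by omega) hL ?_
        intro i hi1 hi2
        rcases Nat.lt_or_ge i hi with h | h
        · by_contra hcontra
          have hpi : pvCmp x strict (a.getD i 0) = true := by
            cases hpv : pvCmp x strict (a.getD i 0)
            · exact absurd hpv hcontra
            · rfl
          exact hc (pv_pvCmp_mono x strict _ _
            (pv_getD_mono a hs ((lo + hi) / 2) i hi1 (by omega)) hpi)
        · exact hR i h hi2
    · rename_i hge
      have : lo = hi := by omega
      subst this
      exact (pv_countP_boundary (pvCmp x strict) a lo hhi hL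
        (fun i h1 h2 => hR i h1 h2)).symm

-- top-level call of count_before counts the satisfying elements
theorem pv_countBefore_full (a : List Int) (x : Int) (strict : Bool)
    (hs : a.Pairwise (· ≤ ·)) :
    pvCountBefore a x strict 0 a.length = a.countP (pvCmp x strict) :=
  pv_countBefore_spec a x strict hs (a.length - 0) 0 a.length rfl (by omega) (le_refl _)
    (fun i hi => absurd hi (by omega)) (fun i h1 h2 => absurd h2 (by omega))

-- splitting the strict count at an interior point
theorem pv_countP_split (a b : Int) (hab : a < b) : ∀ (l : List Int),
    l.countP (pvCmp b true) =
      l.countP (pvCmp a false) + l.countP (fun y => decide (a < y ∧ y < b)) := by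
  intro l
  induction l with
  | nil => simp
  | cons h t ih =>
    simp only [List.countP_cons, ih, pvCmp]
    split_ifs <;> simp_all <;> omega

-- the non-strict count dominates the strict count
theorem pv_countP_le (x : Int) (l : List Int) :
    l.countP (pvCmp x true) ≤ l.countP (pvCmp x false) := by
  apply List.countP_mono_left
  intro y _ hy
  simp [pvCmp] at hy ⊢; omega

-- A's penalty loop is init + factor * (count of indices in the open interval)
theorem pv_foldl_pen (f lo hi : Int) : ∀ (l : List Int) (init : Int),
    l.foldl (fun acc ir => if ir > lo ∧ ir < hi then acc + f else acc) init
      = init + f * l.countP (fun y => decide (lo < y ∧ y < hi)) := by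
  intro l
  induction l with
  | nil => simp
  | cons h t ih =>
    intro init
    simp only [List.foldl_cons, List.countP_cons, ih]
    by_cases hc : h > lo ∧ h < hi
    · have hc' : lo < h ∧ h < hi := ⟨hc.1, hc.2⟩
      simp [hc, hc']; push_cast; ring
    · have hc' : ¬ (lo < h ∧ h < hi) := fun h' => hc ⟨h'.1, h'.2⟩
      simp [hc, hc']

-- one axis: A's scan equals B's sorted-binary-search count
theorem pv_side (a b : Int) (l : List Int) (f : Int) :
    l.foldl (fun acc ir => if ir > min b a ∧ ir < max b a then acc + f else acc) |b - a|
      = (max a b - min a b) + f * max 0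
          (((pvCountBefore (PySem.List.sorted l (fun y => y) false) (max a b) true 0
              (PySem.List.sorted l (fun y => y) false).length : Int))
            - (pvCountBefore (PySem.List.sorted l (fun y => y) false) (min a b) false 0
              (PySem.List.sorted l (fun y => y) false).length : Int)) := by
  set s := PySem.List.sorted l (fun y => y) false with hsdef
  have hpair : s.Pairwise (· ≤ ·) := by
    simpa using PySem.List.sorted_pairwise l (fun y => y)
  have hperm : s.Perm l := PySem.List.sorted_perm l (fun y => y) false
  rw [pv_countBefore_full s (max a b) true hpair, pv_countBefore_full s (min a b) false hpair]
  rw [min_comm b a, max_comm b a]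
  rw [pv_foldl_pen f (min a b) (max a b) l |b - a|]
  have habs : |b - a| = max a b - min a b := by
    rcases le_total a b with h | h
    · rw [abs_of_nonneg (by omega), max_eq_right h, min_eq_left h]
    · rw [abs_of_nonpos (by omega), max_eq_left h, min_eq_right h]; ring
  rw [habs]
  congr 1
  have hcnt : l.countP (fun y => decide (min a b < y ∧ y < max a b))
      = s.countP (fun y => decide (min a b < y ∧ y < max a b)) :=
    (hperm.countP_eq _).symm
  rw [hcnt]
  rcases lt_or_ge (min a b) (max a b) with h | h
  · rw [pv_countP_split (min a b) (max a b) h s]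
    have hmax : max (0:Int)
        ((((s.countP (pvCmp (min a b) false)
            + s.countP (fun y => decide (min a b < y ∧ y < max a b)) : Nat)) : Int)
          - ((s.countP (pvCmp (min a b) false) : Nat) : Int))
        = ((s.countP (fun y => decide (min a b < y ∧ y < max a b)) : Nat) : Int) := by
      push_cast; omega
    rw [hmax]
  · have heq : min a b = max a b := le_antisymm (min_le_max) h
    have hzero : s.countP (fun y => decide (min a b < y ∧ y < max a b)) = 0 := by
      rw [List.countP_eq_zero]
      intro y _; simp; omega
    have hle := pv_countP_le (max a b) s
    rw [hzero, heq]
    rw [max_eq_left (by push_cast; omega)]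
    ring

-- ===== VERDICT (by name: the statement is the Claim_ definition above) =====
theorem distance_expanded_spec : Claim_equal_distance_expanded := by
  intro g1 g2 er ec factor _hdom _hpre
  unfold Spec_distance_expanded distance_expanded distance_expanded_alt
  simp only []
  rw [pv_side (PySem.List.pyGetD g1 0 0) (PySem.List.pyGetD g2 0 0) er (factor - 1),
      pv_side (PySem.List.pyGetD g1 1 0) (PySem.List.pyGetD g2 1 0) ec (factor - 1)]
  ring
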